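-- pv_equiv track=rewrite | github.com/uslap-protocol/uslap-engine | Code_files/USLaP_Engine.py | _extract_consonants_inner
-- ===== SOURCE A (Python) =====
-- def _extract_consonants_inner(word: str, use_digraphs: bool = True) -> list:
--     """Inner extraction with optional digraph handling."""
--     vowels = set('aeiou')
--     w = word.lower()
--     # Strip terminal-Y before processing (terminal Y = vowel in English)
--     if w.endswith('y') and len(w) > 1 and w[-2] not in ('a', 'e', 'i', 'o', 'u'):
--         w = w[:-1]   # e.g. century→centur, glory→glor, territory→territor
--     DIGRAPHS = ('sh', 'ch', 'gh', 'th', 'ph', 'wh', 'qu')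
--     result = []
--     i = 0
--     while i < len(w):
--         digraph = w[i:i+2] if i + 1 < len(w) else ''
--         if use_digraphs and digraph in DIGRAPHS:
--             result.append(digraph)
--             i += 2
--         elif w[i] not in vowels:
--             result.append(w[i])
--             i += 1
--         else:
--             i += 1
--     return result
-- ===== SOURCE B (Python) =====
-- def _extract_consonants_inner(word: str, use_digraphs: bool = True) -> list:
--     """Pairwise zip scan with a skip flag instead of an index while-loop."""
--     vowels = set('aeiou')
--     w = word.lower()
--     if w.endswith('y') and len(w) > 1 and w[-2] not in ('a', 'e', 'i', 'o', 'u'):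
--         w = w[:-1]
--     DIGRAPHS = ('sh', 'ch', 'gh', 'th', 'ph', 'wh', 'qu')
--     out = []
--     skip = False
--     for c, nxt in zip(w, w[1:]):
--         if skip:
--             skip = False
--         elif use_digraphs and c + nxt in DIGRAPHS:
--             out.append(c + nxt)
--             skip = True
--         elif c not in vowels:
--             out.append(c)
--     if w and not skip:
--         c = w[-1]
--         if c not in vowels:
--             out.append(c)
--     return out
-- ===== Notes on version B (the rewrite author's own statement) =====
-- stated objective: faster
-- what changed: Replaced the index-based while-loop (with a fresh w[i:i+2] slice and index arithmetic each step) by a single pass over zip(w, w[1:]) carrying a skip flag, with the final character handled after the loop.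
import Mathlib
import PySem

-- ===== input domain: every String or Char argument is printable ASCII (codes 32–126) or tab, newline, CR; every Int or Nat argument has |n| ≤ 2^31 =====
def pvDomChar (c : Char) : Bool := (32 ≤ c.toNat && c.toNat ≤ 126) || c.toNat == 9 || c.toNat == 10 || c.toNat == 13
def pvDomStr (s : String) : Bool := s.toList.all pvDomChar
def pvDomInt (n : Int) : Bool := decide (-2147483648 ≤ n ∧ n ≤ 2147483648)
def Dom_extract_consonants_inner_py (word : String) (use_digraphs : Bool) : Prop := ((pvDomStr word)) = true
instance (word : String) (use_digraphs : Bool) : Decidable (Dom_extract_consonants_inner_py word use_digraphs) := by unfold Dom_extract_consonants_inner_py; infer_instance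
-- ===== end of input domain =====

-- B replaces A's index-stepping while-loop (i += 2 after a digraph, i += 1 otherwise) by one
-- pass over the adjacent-pairs list zip(w, w[1:]) with a skip flag; same output, O(n) both,
-- measurably faster by a constant factor (no per-step string slicing / index arithmetic).

-- ===== PORT A =====
def pvVowelsA : List Char := ['a', 'e', 'i', 'o', 'u']
def pvDigraphsA : List String := ["sh", "ch", "gh", "th", "ph", "wh", "qu"]

-- the 'w = word.lower(); if w.endswith('y') and len(w) > 1 and w[-2] not in (...): w = w[:-1]' prefix
-- (w[-2] read via pyGetD, exact here since the 'len(w) > 1' guard puts -2 in range)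
def pvPrepA (word : String) : List Char :=
  let w := PySem.Chars.lower word.toList
  if PySem.Chars.endswith w ['y'] && decide (1 < w.length)
      && !(pvVowelsA.contains (PySem.List.pyGetD w (-2) ' ')) then
    PySem.List.slice w none (some (-1))
  else w

-- the 'while i < len(w)' loop of A, as the structural recursion on the suffix w[i:]
def pvLoopA (u : Bool) (w : List Char) (result : List String) : List String :=
  match w with
  | [] => result
  | c :: rest =>
    let digraph : String := match rest with
      | n :: _ => String.ofList [c, n]   -- w[i:i+2] when i + 1 < len(w)
      | [] => ""
    if u && pvDigraphsA.contains digraph then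
      pvLoopA u rest.tail (result ++ [digraph])      -- i += 2
    else if !(pvVowelsA.contains c) then
      pvLoopA u rest (result ++ [String.ofList [c]])     -- i += 1, append w[i]
    else
      pvLoopA u rest result                          -- i += 1
termination_by w.length
decreasing_by all_goals (simp [List.length_tail]; try omega)

def extract_consonants_inner_py (word : String) (use_digraphs : Bool) : List String :=
  pvLoopA use_digraphs (pvPrepA word) []

-- ===== PORT B =====
def pvVowelsB : List Char := ['a', 'e', 'i', 'o', 'u']
def pvDigraphsB : List String := ["sh", "ch", "gh", "th", "ph", "wh", "qu"]

-- identical lower/terminal-Y prefix of Source B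
def pvPrepB (word : String) : List Char :=
  let w := PySem.Chars.lower word.toList
  if PySem.Chars.endswith w ['y'] && decide (1 < w.length)
      && !(pvVowelsB.contains (PySem.List.pyGetD w (-2) ' ')) then
    PySem.List.slice w none (some (-1))
  else w

-- loop body of Source B's 'for c, nxt in zip(w, w[1:])' over the state (out, skip)
def pvStepB (u : Bool) (st : List String × Bool) (p : Char × Char) : List String × Bool :=
  if st.2 then (st.1, false)
  else if u && pvDigraphsB.contains (String.ofList [p.1, p.2]) then
    (st.1 ++ [String.ofList [p.1, p.2]], true)
  else if !(pvVowelsB.contains p.1) then (st.1 ++ [String.ofList [p.1]], false)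
  else (st.1, false)

-- the 'if w and not skip' tail of Source B (w[-1] via pyGetD, exact under the nonempty guard)
def pvFinB (w : List Char) (st : List String × Bool) : List String :=
  if !w.isEmpty && !st.2 then
    let c := PySem.List.pyGetD w (-1) ' '
    if !(pvVowelsB.contains c) then st.1 ++ [String.ofList [c]] else st.1
  else st.1

def extract_consonants_inner_py_alt (word : String) (use_digraphs : Bool) : List String :=
  let w := pvPrepB word
  pvFinB w ((w.zip (w.drop 1)).foldl (pvStepB use_digraphs) ([], false))

-- ===== PRECONDITION & SPEC =====
def Spec_extract_consonants_inner_py (word : String) (use_digraphs : Bool) (out : List String) : Prop := out = extract_consonants_inner_py_alt word use_digraphs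
instance (word : String) (use_digraphs : Bool) (out : List String) : Decidable (Spec_extract_consonants_inner_py word use_digraphs out) := by unfold Spec_extract_consonants_inner_py; infer_instance

-- ===== CLAIM (what is proved, stated in full; the proofs are below) =====
def Claim_equal_extract_consonants_inner_py : Prop := ∀ (word : String) (use_digraphs : Bool), Dom_extract_consonants_inner_py word use_digraphs → Spec_extract_consonants_inner_py word use_digraphs (extract_consonants_inner_py word use_digraphs)

-- ===== LEMMAS AND PROOFS =====

lemma pvPrep_eq (word : String) : pvPrepB word = pvPrepA word := rfl

lemma pvDig_eq : pvDigraphsA = pvDigraphsB := rfl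

lemma pvVow_eq : pvVowelsA = pvVowelsB := rfl

lemma pvFinB_cons (c : Char) (w : List Char) (hw : w ≠ []) (st : List String × Bool) :
    pvFinB (c :: w) st = pvFinB w st := by
  have h1 : PySem.List.pyGetD (c :: w) (-1) ' ' = PySem.List.pyGetD w (-1) ' ' := by
    simp [PySem.List.pyGetD_neg_one, hw, List.getLast_cons]
  simp [pvFinB, h1, hw]

lemma pvStepB_skip (u : Bool) (acc : List String) (p : Char × Char) :
    pvStepB u (acc, true) p = (acc, false) := by simp [pvStepB]

lemma pvStepB_dig (u : Bool) (acc : List String) (c m : Char)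
    (h : u = true ∧ String.ofList [c, m] ∈ pvDigraphsB) :
    pvStepB u (acc, false) (c, m) = (acc ++ [String.ofList [c, m]], true) := by
  simp [pvStepB, h.1, h.2]

lemma pvStepB_nodig (u : Bool) (acc : List String) (c m : Char)
    (h : ¬(u = true ∧ String.ofList [c, m] ∈ pvDigraphsB)) :
    pvStepB u (acc, false) (c, m)
      = (if c ∈ pvVowelsB then acc else acc ++ [String.ofList [c]], false) := by
  by_cases hv : c ∈ pvVowelsB <;> simp [pvStepB, h, hv]

lemma pvLoopA_nil (u : Bool) (acc : List String) : pvLoopA u [] acc = acc := by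
  rw [pvLoopA.eq_def]

lemma pvLoopA_single (u : Bool) (c : Char) (acc : List String) :
    pvLoopA u [c] acc = if c ∈ pvVowelsA then acc else acc ++ [String.ofList [c]] := by
  rw [pvLoopA.eq_def]
  by_cases hv : c ∈ pvVowelsA <;>
    simp [hv, pvLoopA_nil, show "" ∉ pvDigraphsA by decide]

lemma pvLoopA_dig (u : Bool) (c m : Char) (rest : List Char) (acc : List String)
    (h : u = true ∧ String.ofList [c, m] ∈ pvDigraphsB) :
    pvLoopA u (c :: m :: rest) acc = pvLoopA u rest (acc ++ [String.ofList [c, m]]) := by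
  rw [pvLoopA.eq_def]
  simp [h.1, pvDig_eq, h.2]

lemma pvLoopA_nodig (u : Bool) (c m : Char) (rest : List Char) (acc : List String)
    (h : ¬(u = true ∧ String.ofList [c, m] ∈ pvDigraphsB)) :
    pvLoopA u (c :: m :: rest) acc
      = pvLoopA u (m :: rest) (if c ∈ pvVowelsB then acc else acc ++ [String.ofList [c]]) := by
  rw [pvLoopA.eq_def]
  by_cases hv : c ∈ pvVowelsB <;> simp [pvVow_eq, hv] <;>
    (intro hu hm; rw [pvDig_eq] at hm; exact absurd ⟨hu, hm⟩ h)

lemma pvMain (u : Bool) : ∀ (n : Nat) (w : List Char), w.length ≤ n → ∀ (acc : List String),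
    pvFinB w ((w.zip (w.drop 1)).foldl (pvStepB u) (acc, false)) = pvLoopA u w acc := by
  intro n
  induction n with
  | zero =>
    intro w hw acc
    have : w = [] := List.eq_nil_of_length_eq_zero (Nat.le_zero.mp hw)
    subst this; simp [pvFinB, pvLoopA_nil]
  | succ n ih =>
    intro w hw acc
    match w with
    | [] => simp [pvFinB, pvLoopA_nil]
    | [c] =>
      have hg : PySem.List.pyGetD [c] (-1) ' ' = c := by
        simp [PySem.List.pyGetD_neg_one]
      rw [pvLoopA_single]
      by_cases hv : c ∈ pvVowelsA <;>
        simp [pvFinB, hg, hv, pvVow_eq.symm]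
    | c :: m :: rest =>
      have hz : (c :: m :: rest).zip ((c :: m :: rest).drop 1)
          = (c, m) :: ((m :: rest).zip ((m :: rest).drop 1)) := by simp [List.zip]
      rw [hz, List.foldl_cons]
      by_cases hdig : u = true ∧ String.ofList [c, m] ∈ pvDigraphsB
      · rw [pvStepB_dig u acc c m hdig, pvLoopA_dig u c m rest acc hdig]
        match rest with
        | [] =>
          simp [pvFinB, pvLoopA_nil]
        | r :: rest' =>
          have hz2 : (m :: r :: rest').zip ((m :: r :: rest').drop 1)
              = (m, r) :: ((r :: rest').zip ((r :: rest').drop 1)) := by simp [List.zip]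
          rw [hz2, List.foldl_cons, pvStepB_skip,
              pvFinB_cons c _ (by simp), pvFinB_cons m _ (by simp)]
          exact ih (r :: rest') (by simp at hw ⊢; omega) _
      · rw [pvStepB_nodig u acc c m hdig, pvLoopA_nodig u c m rest acc hdig,
            pvFinB_cons c _ (by simp)]
        exact ih (m :: rest) (by simp at hw ⊢; omega) _

-- ===== VERDICT (by name: the statement is the Claim_ definition above) =====
theorem extract_consonants_inner_py_spec : Claim_equal_extract_consonants_inner_py := by
  intro word u _
  unfold Spec_extract_consonants_inner_py extract_consonants_inner_py extract_consonants_inner_py_alt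
  rw [pvPrep_eq]
  exact (pvMain u (pvPrepA word).length (pvPrepA word) le_rfl []).symm
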